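-- pv_equiv track=rewrite | github.com/Tianmingla/12306 | DataScript/4_5generate_seats_and_carriages.py | generate_second_class_seat_numbers
-- ===== SOURCE A (Python) =====
-- from typing import Dict, List, Tuple, Any, Optional
--
-- def generate_second_class_seat_numbers(total_seats: int) -> List[str]:
--     """
--     生成二等座座位号（5 座排：A-B-C-D-F）。
--
--     二等座车厢通常有 90 个座位，排布为 2+3（过道两侧）。
--     A/F 靠窗，C/D 靠过道，B 中间。
--     """
--     seats_per_row = 5
--     letter_order = ['A', 'B', 'C', 'D', 'F']
--
--     seat_numbers = []
--     row = 1
--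
--     while len(seat_numbers) < total_seats:
--         for letter in letter_order:
--             if len(seat_numbers) >= total_seats:
--                 break
--             seat_numbers.append(f"{row:02d}{letter}")
--         row += 1
--
--     return seat_numbers[:total_seats]
-- ===== SOURCE B (Python) =====
-- def generate_second_class_seat_numbers(total_seats: int):
--     letter_order = ['A', 'B', 'C', 'D', 'F']
--     return [f"{i // 5 + 1:02d}{letter_order[i % 5]}" for i in range(total_seats)]
-- ===== Notes on version B (the rewrite author's own statement) =====
-- stated objective: simpler
-- what changed: Replaces the while/for/break row counter and final slice with a single comprehension that derives row and letter arithmetically from a flat index via divmod.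
import Mathlib
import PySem

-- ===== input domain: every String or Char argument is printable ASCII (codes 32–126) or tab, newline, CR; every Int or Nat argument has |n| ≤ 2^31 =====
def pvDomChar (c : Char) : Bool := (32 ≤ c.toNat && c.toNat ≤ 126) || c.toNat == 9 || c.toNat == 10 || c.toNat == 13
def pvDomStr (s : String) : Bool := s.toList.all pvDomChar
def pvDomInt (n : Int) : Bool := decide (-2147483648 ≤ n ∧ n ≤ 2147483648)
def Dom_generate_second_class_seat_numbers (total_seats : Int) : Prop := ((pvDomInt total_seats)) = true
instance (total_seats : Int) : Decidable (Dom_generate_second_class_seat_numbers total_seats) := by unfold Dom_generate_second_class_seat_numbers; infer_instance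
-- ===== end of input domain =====

-- B replaces A's while/for/break row counter and final slice by a single comprehension
-- deriving row and letter arithmetically from a flat index (divmod); objective: simpler.

-- ===== PORT A =====
-- letter_order = ['A', 'B', 'C', 'D', 'F']
def pvLetters : List String := ["A", "B", "C", "D", "F"]

-- f"{row:02d}": str(row) zero-padded to width 2 (sign stays in front, like Python's 02d)
def pvFmt02 (r : Int) : String := PySem.Str.zfill (PySem.Int.toStr r) 2

-- inner 'for letter in letter_order' with its break: once len(seat_numbers) >= total_seats
-- holds it stays true (the list only grows), so skipping the remaining letters equals breaking.
def pvInnerA (total : Int) (row : Int) (acc : List String) : List String :=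
  pvLetters.foldl (fun acc letter =>
    if (acc.length : Int) ≥ total then acc else acc ++ [pvFmt02 row ++ letter]) acc

-- the while loop; fuel total_seats.toNat suffices since each pass appends at least one seat.
def pvLoopA (fuel : Nat) (total : Int) (acc : List String) (row : Int) : List String :=
  match fuel with
  | 0 => acc
  | fuel + 1 =>
      if (acc.length : Int) < total then
        pvLoopA fuel total (pvInnerA total row acc) (row + 1)
      else acc

def generate_second_class_seat_numbers (total_seats : Int) : List String :=
  PySem.List.slice (pvLoopA total_seats.toNat total_seats [] 1) none (some total_seats)

-- ===== PORT B =====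
def generate_second_class_seat_numbers_alt (total_seats : Int) : List String :=
  (PySem.List.pyRange 0 total_seats 1).map (fun i =>
    pvFmt02 (PySem.Int.floordiv i 5 + 1) ++ PySem.List.pyGetD pvLetters (PySem.Int.mod i 5) "")

-- ===== PRECONDITION & SPEC =====
def Spec_generate_second_class_seat_numbers (total_seats : Int) (out : List String) : Prop := out = generate_second_class_seat_numbers_alt total_seats
instance (total_seats : Int) (out : List String) : Decidable (Spec_generate_second_class_seat_numbers total_seats out) := by unfold Spec_generate_second_class_seat_numbers; infer_instance

-- ===== CLAIM (what is proved, stated in full; the proofs are below) =====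
def Claim_equal_generate_second_class_seat_numbers : Prop := ∀ (total_seats : Int), Dom_generate_second_class_seat_numbers total_seats → Spec_generate_second_class_seat_numbers total_seats (generate_second_class_seat_numbers total_seats)

-- ===== LEMMAS AND PROOFS =====

-- the seat string at flat index i (Nat side)
def pvG (i : Nat) : String := pvFmt02 (((i / 5 : Nat) : Int) + 1) ++ pvLetters.getD (i % 5) ""

theorem pvG_cast (i : Nat) :
    pvFmt02 (PySem.Int.floordiv (i : Int) 5 + 1) ++ PySem.List.pyGetD pvLetters (PySem.Int.mod (i : Int) 5) "" = pvG i := by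
  have h5 : ((5 : Nat) : Int) = (5 : Int) := rfl
  rw [pvG, ← h5, PySem.Int.floordiv_natCast, PySem.Int.mod_natCast, PySem.List.pyGetD_natCast]

theorem pvG_split (k j : Nat) (hj : j < 5) :
    pvG (5 * k + j) = pvFmt02 ((k : Int) + 1) ++ pvLetters.getD j "" := by
  have h1 : (5 * k + j) / 5 = k := by omega
  have h2 : (5 * k + j) % 5 = j := by omega
  rw [pvG, h1, h2]

theorem pvInner_step (n k j : Nat) (hj : j < 5) (letter : String)
    (hl : pvLetters.getD j "" = letter) :
    (if ((((List.range (min (5 * k + j) n)).map pvG).length : Int) ≥ (n : Int)) then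
        (List.range (min (5 * k + j) n)).map pvG
      else ((List.range (min (5 * k + j) n)).map pvG) ++ [pvFmt02 ((k : Int) + 1) ++ letter])
    = (List.range (min (5 * k + j + 1) n)).map pvG := by
  by_cases h : 5 * k + j < n
  · have hmin : min (5 * k + j) n = 5 * k + j := by omega
    have hmin' : min (5 * k + j + 1) n = 5 * k + j + 1 := by omega
    simp only [hmin, hmin', List.length_map, List.length_range]
    rw [if_neg (by exact_mod_cast by omega), List.range_succ, List.map_append, List.map_cons,
      List.map_nil, pvG_split k j hj, hl]
  · have hmin : min (5 * k + j) n = n := by omega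
    have hmin' : min (5 * k + j + 1) n = n := by omega
    simp only [hmin, hmin', List.length_map, List.length_range]
    rw [if_pos (by exact_mod_cast by omega)]

theorem pvInner_eq (n k : Nat) :
    pvInnerA (n : Int) ((k : Int) + 1) ((List.range (min (5 * k) n)).map pvG)
    = (List.range (min (5 * k + 5) n)).map pvG := by
  have s0 := pvInner_step n k 0 (by omega) "A" (by rfl)
  have s1 := pvInner_step n k 1 (by omega) "B" (by rfl)
  have s2 := pvInner_step n k 2 (by omega) "C" (by rfl)
  have s3 := pvInner_step n k 3 (by omega) "D" (by rfl)
  have s4 := pvInner_step n k 4 (by omega) "F" (by rfl)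
  simp only [pvInnerA, pvLetters, List.foldl]
  simp only [show 5 * k + 0 = 5 * k from rfl] at s0
  rw [s0, s1, s2, s3, s4]

theorem pvLoop_inv (fuel k n : Nat) (h : n ≤ 5 * k + 5 * fuel) :
    pvLoopA fuel (n : Int) ((List.range (min (5 * k) n)).map pvG) ((k : Int) + 1)
    = (List.range n).map pvG := by
  induction fuel generalizing k with
  | zero =>
      have hmin : min (5 * k) n = n := by omega
      simp [pvLoopA, hmin]
  | succ fuel ih =>
      by_cases hlt : 5 * k < n
      · have hmin : min (5 * k) n = 5 * k := by omega
        rw [pvLoopA]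
        rw [if_pos (by simp [hmin]; exact_mod_cast hlt)]
        rw [pvInner_eq n k]
        have : (List.range (min (5 * k + 5) n)).map pvG
            = (List.range (min (5 * (k + 1)) n)).map pvG := by ring_nf
        rw [this]
        have hcast : (k : Int) + 1 + 1 = ((k + 1 : Nat) : Int) + 1 := by push_cast; ring
        rw [hcast, ih (k + 1) (by omega)]
      · have hmin : min (5 * k) n = n := by omega
        rw [pvLoopA]
        rw [if_neg (by simp [hmin])]
        rw [hmin]

-- ===== VERDICT (by name: the statement is the Claim_ definition above) =====
theorem generate_second_class_seat_numbers_spec : Claim_equal_generate_second_class_seat_numbers := by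
  intro t _
  unfold Spec_generate_second_class_seat_numbers generate_second_class_seat_numbers
    generate_second_class_seat_numbers_alt
  by_cases ht : 0 ≤ t
  · set n := t.toNat with hn
    have htn : t = (n : Int) := by omega
    rw [htn]
    have hloop := pvLoop_inv n 0 n (by omega)
    simp only [Nat.mul_zero, Nat.zero_min, List.range_zero, List.map_nil, Nat.cast_zero, zero_add] at hloop ⊢
    rw [hloop, PySem.List.slice_to_natCast, PySem.List.pyRange_one]
    rw [List.take_of_length_le (by simp)]
    rw [List.map_map]
    · refine List.map_congr_left (fun k _ => ?_) |>.symm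
      simp only [Function.comp, zero_add]
      exact pvG_cast k
  · have h0 : t.toNat = 0 := by omega
    rw [h0, PySem.List.pyRange_one_eq_nil (by omega)]
    simp [pvLoopA, PySem.List.slice]
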